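-- pv_equiv track=rewrite | github.com/pypi-data/pypi-mirror-319 | packages/octomy-common/octomy_common-2.0.56.tar.gz/octomy_common-2.0.56/quarantine/db/Connection.py | stripes
-- ===== SOURCE A (Python) =====
-- def stripes(cols=79, rows=3, on=3, off=3, on_char="#", off_char=" ", offset=0, sheer=1):
-- 	out=""
-- 	alphabet = on_char * on + off_char * off
-- 	alphabet_len=len(alphabet)
-- 	for row in range(0, rows):
-- 		index = offset
-- 		for col in range(0, cols):
-- 			alphabet_index = index % alphabet_len
-- 			out += alphabet[alphabet_index]
-- 			index += 1
-- 		offset+=sheer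
-- 		out+="\n"
-- 	return out
-- ===== SOURCE B (Python) =====
-- def stripes(cols=79, rows=3, on=3, off=3, on_char="#", off_char=" ", offset=0, sheer=1):
-- 	alphabet = on_char * on + off_char * off
-- 	alphabet_len = len(alphabet)
-- 	lines = []
-- 	for row in range(rows):
-- 		if cols > 0:
-- 			start = (offset + row * sheer) % alphabet_len
-- 			chunk = alphabet[start:start + cols]
-- 			rem = cols - len(chunk)
-- 			if rem > 0:
-- 				chunk += alphabet * (rem // alphabet_len) + alphabet[:rem % alphabet_len]
-- 			lines.append(chunk)
-- 		else:
-- 			lines.append("")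
-- 	return "".join(line + "\n" for line in lines)
-- ===== Notes on version B (the rewrite author's own statement) =====
-- stated objective: faster
-- what changed: Replaces the per-character inner modulo loop and quadratic string += with per-row bulk slicing: each row is alphabet[start:start+cols] extended by whole alphabet repeats and a prefix when it wraps, joined at the end.
import Mathlib
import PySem

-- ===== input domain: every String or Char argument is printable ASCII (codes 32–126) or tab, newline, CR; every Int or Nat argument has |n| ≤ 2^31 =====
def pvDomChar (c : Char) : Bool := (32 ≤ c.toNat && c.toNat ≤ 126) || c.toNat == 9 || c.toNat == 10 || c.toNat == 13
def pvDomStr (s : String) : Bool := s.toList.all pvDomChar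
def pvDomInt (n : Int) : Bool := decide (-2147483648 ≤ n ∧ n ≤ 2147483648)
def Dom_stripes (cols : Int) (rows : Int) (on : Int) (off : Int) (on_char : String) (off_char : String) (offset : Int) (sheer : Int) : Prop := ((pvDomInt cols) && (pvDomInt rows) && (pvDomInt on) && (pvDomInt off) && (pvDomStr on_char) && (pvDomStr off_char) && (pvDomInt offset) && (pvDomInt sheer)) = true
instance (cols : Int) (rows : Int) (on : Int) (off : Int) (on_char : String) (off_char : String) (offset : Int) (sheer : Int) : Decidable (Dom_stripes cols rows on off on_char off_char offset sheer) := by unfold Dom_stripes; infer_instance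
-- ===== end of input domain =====

-- B replaces A's per-character modulo loop (with quadratic string +=) by per-row bulk
-- slices of the alphabet (window + whole repeats + prefix); measured faster.

-- ===== PORT A =====
-- inner loop 'for col in range(0, cols)': state (out, index); alphabet[index % alphabet_len]
-- is always in range when the mod succeeds, so xs[i] is ported as pyGetD (exact there).
def stripesInner (alphabet : List Char) (alphabet_len : Int) (cols : Int) (st : List Char × Int) : List Char × Int :=
  (PySem.List.pyRange 0 cols 1).foldl
    (fun st2 _col =>
      (st2.1 ++ [PySem.List.pyGetD alphabet (PySem.Int.mod st2.2 alphabet_len) ' '], st2.2 + 1))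
    st

-- one iteration of the outer loop: run the inner loop from index = offset, append "\n", offset += sheer
def stripesOuter (alphabet : List Char) (alphabet_len : Int) (cols : Int) (sheer : Int) (st : List Char × Int) : List Char × Int :=
  ((stripesInner alphabet alphabet_len cols (st.1, st.2)).1 ++ ['\n'], st.2 + sheer)

def stripes (cols : Int) (rows : Int) (on : Int) (off : Int) (on_char : String) (off_char : String) (offset : Int) (sheer : Int) : String :=
  let alphabet : List Char := PySem.List.pyRepeat on_char.toList on ++ PySem.List.pyRepeat off_char.toList off
  let alphabet_len : Int := alphabet.length
  String.mk ((PySem.List.pyRange 0 rows 1).foldl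
    (fun st _row => stripesOuter alphabet alphabet_len cols sheer st)
    (([] : List Char), offset)).1

-- ===== PORT B =====
-- one row of B: window of the alphabet starting at 'start', wrapped around by whole
-- repeats plus a prefix (empty row when cols <= 0)
def stripesAltLine (alphabet : List Char) (alphabet_len : Int) (cols : Int) (offset : Int) (sheer : Int) (row : Int) : List Char :=
  if cols > 0 then
    let start := PySem.Int.mod (offset + row * sheer) alphabet_len
    let chunk := PySem.List.slice alphabet (some start) (some (start + cols))
    let rem := cols - (chunk.length : Int)
    if rem > 0 then
      chunk ++ PySem.List.pyRepeat alphabet (PySem.Int.floordiv rem alphabet_len)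
        ++ PySem.List.slice alphabet none (some (PySem.Int.mod rem alphabet_len))
    else chunk
  else []

def stripes_alt (cols : Int) (rows : Int) (on : Int) (off : Int) (on_char : String) (off_char : String) (offset : Int) (sheer : Int) : String :=
  let alphabet : List Char := PySem.List.pyRepeat on_char.toList on ++ PySem.List.pyRepeat off_char.toList off
  let alphabet_len : Int := alphabet.length
  String.mk (((PySem.List.pyRange 0 rows 1).map (stripesAltLine alphabet alphabet_len cols offset sheer)).flatMap
    (fun line => line ++ ['\n']))

-- ===== PRECONDITION & SPEC =====
-- Pre_ excludes exactly the inputs where A raises ZeroDivisionError ('index % 0' when the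
-- alphabet is empty and a character is actually demanded, i.e. cols > 0 and rows > 0);
-- B raises there too.  A returns on every input admitted here.
def Pre_stripes (cols : Int) (rows : Int) (on : Int) (off : Int) (on_char : String) (off_char : String) (offset : Int) (sheer : Int) : Prop :=
  0 < cols → 0 < rows → 0 < on.toNat * on_char.toList.length + off.toNat * off_char.toList.length
instance (cols : Int) (rows : Int) (on : Int) (off : Int) (on_char : String) (off_char : String) (offset : Int) (sheer : Int) : Decidable (Pre_stripes cols rows on off on_char off_char offset sheer) := by unfold Pre_stripes; infer_instance

def pvWitness_stripes : Int × Int × Int × Int × String × String × Int × Int := (7, 3, 2, 2, "#", " ", 1, 1)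

def Spec_stripes (cols : Int) (rows : Int) (on : Int) (off : Int) (on_char : String) (off_char : String) (offset : Int) (sheer : Int) (out : String) : Prop := out = stripes_alt cols rows on off on_char off_char offset sheer
instance (cols : Int) (rows : Int) (on : Int) (off : Int) (on_char : String) (off_char : String) (offset : Int) (sheer : Int) (out : String) : Decidable (Spec_stripes cols rows on off on_char off_char offset sheer out) := by unfold Spec_stripes; infer_instance

-- ===== CLAIM (what is proved, stated in full; the proofs are below) =====
def Claim_equal_stripes : Prop := ∀ (cols : Int) (rows : Int) (on : Int) (off : Int) (on_char : String) (off_char : String) (offset : Int) (sheer : Int), Dom_stripes cols rows on off on_char off_char offset sheer → Pre_stripes cols rows on off on_char off_char offset sheer → Spec_stripes cols rows on off on_char off_char offset sheer (stripes cols rows on off on_char off_char offset sheer)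

-- ===== LEMMAS AND PROOFS =====

-- the characters of one row, as a specification both ports are reduced to
def rowSpec (al : List Char) (idx : Int) (c : Nat) : List Char :=
  (List.range c).map (fun (k : Nat) => al.getD ((idx + (k : Int)) % (al.length : Int)).toNat ' ')

theorem length_pyRepeat (xs : List Char) (n : Int) :
    (PySem.List.pyRepeat xs n).length = n.toNat * xs.length := by
  simp [PySem.List.pyRepeat, List.length_flatten]

theorem flat_rep_get (al : List Char) (hl : 0 < al.length) (m j : Nat)
    (h : j < ((List.replicate m al).flatten).length) :
    ((List.replicate m al).flatten)[j] = al[j % al.length]'(Nat.mod_lt _ hl) := by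
  induction m generalizing j with
  | zero => simp at h
  | succ m ih =>
    have e : (List.replicate (m+1) al).flatten = al ++ (List.replicate m al).flatten := by
      rw [List.replicate_succ, List.flatten_cons]
    have h' : j < (al ++ (List.replicate m al).flatten).length := by rw [← e]; exact h
    rw [List.getElem_of_eq e]
    by_cases hj : j < al.length
    · rw [List.getElem_append_left hj]
      congr 1
      exact (Nat.mod_eq_of_lt hj).symm
    · push_neg at hj
      rw [List.getElem_append_right hj]
      rw [ih (j - al.length) (by simp at h' ⊢; omega)]
      congr 1
      exact (Nat.mod_eq_sub_mod hj).symm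

theorem inner_aux (al : List Char) (hl : 0 < al.length) (c : Nat) (out : List Char) (idx : Int) :
    stripesInner al (al.length : Int) (c : Int) (out, idx) = (out ++ rowSpec al idx c, idx + c) := by
  induction c generalizing out idx with
  | zero =>
    simp [stripesInner, PySem.List.pyRange_one_eq_nil, rowSpec]
  | succ c ih =>
    have hr : PySem.List.pyRange 0 ((c : Int) + 1) 1
        = PySem.List.pyRange 0 (c : Int) 1 ++ [(c : Int)] :=
      PySem.List.pyRange_one_succ_right (by positivity)
    have hcast : ((c + 1 : Nat) : Int) = (c : Int) + 1 := by push_cast; ring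
    unfold stripesInner
    rw [hcast, hr, List.foldl_append]
    have := ih out idx
    unfold stripesInner at this
    rw [this]
    simp only [List.foldl_cons, List.foldl_nil]
    rw [Prod.mk.injEq]
    constructor
    · have hpos : (0:Int) < (al.length : Int) := by exact_mod_cast hl
      have hmod : PySem.Int.mod (idx + (c:Int)) (al.length : Int) = (idx + (c:Int)) % (al.length : Int) :=
        PySem.Int.mod_eq_emod_of_pos hpos
      have h0 : 0 ≤ (idx + (c:Int)) % (al.length : Int) := Int.emod_nonneg _ (by omega)
      have h1 : (idx + (c:Int)) % (al.length : Int) < (al.length : Int) := Int.emod_lt_of_pos _ hpos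
      have hrs : rowSpec al idx (c+1) = rowSpec al idx c ++ [al.getD ((idx + (c:Int)) % (al.length:Int)).toNat ' '] := by
        simp [rowSpec, List.range_succ]
      rw [hmod, PySem.List.pyGetD_eq_getElem al ' ' h0 (by exact_mod_cast h1), hrs, ← List.append_assoc]
      congr 1
      rw [List.getD_eq_getElem _ _ (by omega)]
    · ring

theorem inner_eq (al : List Char) (cols : Int) (h : 0 < al.length ∨ cols ≤ 0)
    (out : List Char) (idx : Int) :
    (stripesInner al (al.length : Int) cols (out, idx)).1 = out ++ rowSpec al idx cols.toNat := by
  rcases h with hl | hc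
  · by_cases hc : cols ≤ 0
    · simp [stripesInner, PySem.List.pyRange_one_eq_nil hc, rowSpec, (by omega : cols.toNat = 0)]
    · have hcast : ((cols.toNat : Nat) : Int) = cols := Int.toNat_of_nonneg (by omega)
      rw [← hcast, inner_aux al hl]
      simp only [Int.toNat_natCast]
  · simp [stripesInner, PySem.List.pyRange_one_eq_nil hc, rowSpec, (by omega : cols.toNat = 0)]

theorem outer_aux (al : List Char) (cols sheer : Int) (h : 0 < al.length ∨ cols ≤ 0)
    (m : Nat) (out : List Char) (off0 : Int) :
    (PySem.List.pyRange 0 (m : Int) 1).foldl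
      (fun st _row => stripesOuter al (al.length : Int) cols sheer st) (out, off0)
    = (out ++ ((List.range m).map
        (fun (r : Nat) => rowSpec al (off0 + (r : Int) * sheer) cols.toNat ++ ['\n'])).flatten,
       off0 + (m : Int) * sheer) := by
  induction m with
  | zero => simp [PySem.List.pyRange_one_eq_nil (by omega : (0:Int) ≤ 0)]
  | succ m ih =>
    have hcast : ((m + 1 : Nat) : Int) = (m : Int) + 1 := by push_cast; ring
    rw [hcast, PySem.List.pyRange_one_succ_right (by positivity), List.foldl_append, ih]
    simp only [List.foldl_cons, List.foldl_nil]
    unfold stripesOuter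
    rw [Prod.mk.injEq]
    constructor
    · rw [inner_eq al cols h]
      simp [List.range_succ, List.append_assoc]
    · push_cast; ring

theorem altLine_eq (al : List Char) (cols offset sheer : Int) (h : 0 < al.length ∨ cols ≤ 0)
    (r : Int) :
    stripesAltLine al (al.length : Int) cols offset sheer r
    = rowSpec al (offset + r * sheer) cols.toNat := by
  by_cases hc0 : cols ≤ 0
  · rw [stripesAltLine, if_neg (by omega : ¬ cols > 0)]
    simp [rowSpec, (by omega : cols.toNat = 0)]
  have hc : 0 < cols := by omega
  have hl : 0 < al.length := by rcases h with hl | h0; exact hl; omega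
  have hpos : (0:Int) < (al.length : Int) := by exact_mod_cast hl
  rw [stripesAltLine, if_pos hc]
  set idx := offset + r * sheer with hidx
  set L : Int := (al.length : Int) with hLdef
  have hmod : PySem.Int.mod idx L = idx % L := PySem.Int.mod_eq_emod_of_pos hpos
  have h0 : 0 ≤ idx % L := Int.emod_nonneg _ (by omega)
  have h1 : idx % L < L := Int.emod_lt_of_pos _ hpos
  set s : Nat := (idx % L).toNat with hs
  have hs_int : (s : Int) = idx % L := Int.toNat_of_nonneg h0
  set c : Nat := cols.toNat with hcn
  have hc_int : (c : Int) = cols := Int.toNat_of_nonneg (by omega)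
  have hslice : PySem.List.slice al (some (idx % L)) (some (idx % L + cols))
      = List.take c (List.drop s al) := by
    rw [PySem.List.slice_toNat _ h0 (by omega)]
    congr 1
    omega
  -- the index equality shared by all cases: (idx + k) % L, as a Nat, is (s + k) % |al|
  have hsk : ∀ k : Nat, ((idx + (k:Nat) : Int) % L).toNat = (s + k) % al.length := by
    intro k
    have e2 : (idx + (k:Int)) % L = ((s:Int) + (k:Int)) % L := by
      rw [Int.add_emod idx, Int.add_emod (s:Int)]
      rw [hs_int, Int.emod_emod_of_dvd _ dvd_rfl]
    rw [e2, show ((s:Int)+(k:Int)) = ((s+k : Nat) : Int) by push_cast; ring]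
    rw [← Int.natCast_mod, Int.toNat_natCast]
  have hsd : s < al.length := by omega
  by_cases hfit : c ≤ al.length - s
  · -- the window does not wrap: rem = 0 and the chunk is the whole row
    have hmin : min c (al.length - s) = c := by omega
    simp only [hmod, hslice, List.length_take, List.length_drop, hmin]
    rw [if_neg (by omega)]
    apply List.ext_getElem
    · simp [rowSpec]
      omega
    · intro k hk1 hk2
      rw [List.getElem_take, List.getElem_drop]
      simp only [rowSpec, List.getElem_map, List.getElem_range]
      rw [← hLdef, List.getD_eq_getElem _ _ (by rw [hsk k]; exact Nat.mod_lt _ hl)]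
      congr 1
      rw [hsk k, Nat.mod_eq_of_lt (by simp at hk1; omega)]
  · -- the window wraps: whole repeats of the alphabet plus a prefix
    set m1 : Nat := al.length - s with hm1
    have hmin : min c (al.length - s) = m1 := by omega
    set rm : Nat := c - m1 with hrm
    have hrm_int : (rm : Int) = cols - (m1 : Int) := by omega
    set q : Nat := rm / al.length with hqdef
    set rr : Nat := rm % al.length with hrrdef
    have hq : q * al.length + rr = rm := by rw [Nat.mul_comm]; exact Nat.div_add_mod rm al.length
    have hrr : rr < al.length := Nat.mod_lt _ hl
    have hfd2 : PySem.Int.floordiv (cols - (m1:Int)) L = (q : Int) := by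
      rw [PySem.Int.floordiv_eq_ediv_of_pos hpos, ← hrm_int, hLdef, hqdef]
      exact (Int.natCast_div rm al.length).symm
    have hmod2 : PySem.Int.mod (cols - (m1:Int)) L = (rr : Int) := by
      rw [PySem.Int.mod_eq_emod_of_pos hpos, ← hrm_int, hLdef, hrrdef]
      exact (Int.natCast_mod rm al.length).symm
    have hsl2 : PySem.List.slice al none (some ((rr:Nat) : Int)) = List.take rr al := by
      rw [PySem.List.slice_to _ (by positivity)]
      simp
    have hrep : PySem.List.pyRepeat al ((q:Nat) : Int) = (List.replicate q al).flatten := by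
      simp [PySem.List.pyRepeat]
    simp only [hmod, hslice, List.length_take, List.length_drop, hmin, hfd2, hmod2, hsl2, hrep]
    rw [if_pos (by omega)]
    apply List.ext_getElem
    · simp only [List.length_append, List.length_take, List.length_drop, hmin,
        List.length_flatten, List.map_replicate, List.sum_replicate, smul_eq_mul, rowSpec,
        List.length_map, List.length_range]
      have hmr : min rr al.length = rr := by omega
      rw [hmr]
      omega
    · intro k hk1 hk2
      simp only [rowSpec, List.getElem_map, List.getElem_range]
      rw [← hLdef, List.getD_eq_getElem _ _ (by rw [hsk k]; exact Nat.mod_lt _ hl)]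
      have hlen1 : (List.take c (List.drop s al)).length = m1 := by
        simp [hmin]
      have hflen : ((List.replicate q al).flatten).length = q * al.length := by
        simp [List.length_flatten]
      have hlen12 : (List.take c (List.drop s al) ++ (List.replicate q al).flatten).length
          = m1 + q * al.length := by
        rw [List.length_append, hlen1, hflen]
      by_cases hk3 : k < m1
      · rw [List.getElem_append_left (by rw [hlen12]; omega)]
        rw [List.getElem_append_left (by rw [hlen1]; exact hk3)]
        rw [List.getElem_take, List.getElem_drop]
        congr 1
        rw [hsk k, Nat.mod_eq_of_lt (by omega)]
      · by_cases hk4 : k < m1 + q * al.length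
        · rw [List.getElem_append_left (by rw [hlen12]; omega)]
          rw [List.getElem_append_right (by rw [hlen1]; omega)]
          simp only [hlen1]
          rw [flat_rep_get al hl _ _ (by rw [hflen]; omega)]
          congr 1
          rw [hsk k]
          have he : s + k = al.length + (k - m1) := by omega
          rw [he, Nat.add_mod_left]
        · rw [List.getElem_append_right (by rw [hlen12]; omega)]
          simp only [hlen12, List.getElem_take]
          congr 1
          rw [hsk k]
          have h5 : k - (m1 + q * al.length) < rr := by
            simp only [List.length_append, hlen1, hflen, List.length_take] at hk1
            omega
          have h6 : s + k = (k - (m1 + q * al.length)) + (q + 1) * al.length := by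
            have hx : (q + 1) * al.length = q * al.length + al.length := by ring
            omega
          rw [h6, Nat.add_mul_mod_self_right]
          exact (Nat.mod_eq_of_lt (by omega)).symm

-- ===== VERDICT (by name: the statement is the Claim_ definition above) =====
theorem stripes_spec : Claim_equal_stripes := by
  intro cols rows on off on_char off_char offset sheer _hdom hpre
  unfold Spec_stripes stripes stripes_alt
  dsimp only
  set al := PySem.List.pyRepeat on_char.toList on ++ PySem.List.pyRepeat off_char.toList off with hal
  congr 1
  by_cases hr : rows ≤ 0
  · rw [PySem.List.pyRange_one_eq_nil hr]
    simp
  · have h : 0 < al.length ∨ cols ≤ 0 := by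
      by_cases hcc : cols ≤ 0
      · exact Or.inr hcc
      · left
        have halen : al.length = on.toNat * on_char.toList.length + off.toNat * off_char.toList.length := by
          simp [hal, length_pyRepeat]
        rw [halen]
        exact hpre (by omega) (by omega)
    have hrows : ((rows.toNat : Nat) : Int) = rows := Int.toNat_of_nonneg (by omega)
    rw [← hrows, outer_aux al cols sheer h rows.toNat [] offset]
    rw [PySem.List.pyRange_zero_natCast, List.map_map]
    rw [show ∀ (l : List (List Char)), l.flatMap (fun line => line ++ ['\n']) = (l.map (fun line => line ++ ['\n'])).flatten from fun l => by simp [List.flatMap_def]]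
    rw [List.map_map]
    simp only [List.nil_append]
    congr 1
    apply List.map_congr_left
    intro a _ha
    simp only [Function.comp]
    rw [altLine_eq al cols offset sheer h (a : Int)]
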